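-- pv_equiv track=rewrite | github.com/honeysuckcle/my-practice-of-leetcode | Weekly competition/317/3.py | makeIntegerBeautiful
-- ===== SOURCE A (Python) =====
-- def makeIntegerBeautiful(n: int, target: int) -> int:
--     nums = [0] * 13
--     res = 0
--     count = 0
--     while n > 0:
--         b = n % 10
--         nums[count] = b
--         count += 1
--         n = n // 10
--     if sum(nums) <= target:
--         return 0
--     sit = 0
--     while sum(nums) > target:
--         res += pow(10, sit) * (10 - nums[sit])
--         nums[sit] = 0
--         nums[sit+1] += 1
--         sit += 1
--     return res
-- ===== SOURCE B (Python) =====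
-- def makeIntegerBeautiful(n: int, target: int) -> int:
--     def digitsum(m: int) -> int:
--         s = 0
--         while m > 0:
--             s += m % 10
--             m //= 10
--         return s
--     if digitsum(n) <= target:
--         return 0
--     base = 10
--     while True:
--         new_n = (n // base + 1) * base   # smallest multiple of base strictly greater than n
--         if digitsum(new_n) <= target:
--             return new_n - n
--         base *= 10
-- ===== Notes on version B (the rewrite author's own statement) =====
-- stated objective: simpler
-- what changed: Replaces the 13-cell digit array with manual carry propagation by pure integer arithmetic: compute digitsum(n), and if it exceeds target round n up to the next multiple of 10, 100, 1000, ... until the digit sum fits, returning the difference.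
import Mathlib
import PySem

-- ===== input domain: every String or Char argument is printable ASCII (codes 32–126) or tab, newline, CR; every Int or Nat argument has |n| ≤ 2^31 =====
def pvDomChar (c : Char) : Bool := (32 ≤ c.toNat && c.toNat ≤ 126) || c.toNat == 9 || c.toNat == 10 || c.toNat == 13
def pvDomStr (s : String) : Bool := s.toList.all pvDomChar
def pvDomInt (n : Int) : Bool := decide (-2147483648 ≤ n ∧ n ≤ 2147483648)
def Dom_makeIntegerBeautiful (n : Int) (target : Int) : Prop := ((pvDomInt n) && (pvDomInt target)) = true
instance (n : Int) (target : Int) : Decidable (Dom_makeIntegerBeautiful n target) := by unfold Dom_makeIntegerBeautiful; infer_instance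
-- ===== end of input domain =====

-- B replaces A's 13-cell digit array and manual carry propagation by pure integer
-- arithmetic (round n up to the next multiple of 10^k until the digit sum fits); objective: simpler.

-- ===== PORT A =====
-- first while loop: extract the digits of n into nums (low digit first)
def pvA_loop1 (n : Int) (nums : List Int) (count : Nat) : List Int × Nat :=
  if h : n > 0 then
    pvA_loop1 (PySem.Int.floordiv n 10) (nums.set count (PySem.Int.mod n 10)) (count + 1)
  else (nums, count)
termination_by n.toNat
decreasing_by
  rw [PySem.Int.floordiv_eq_ediv_of_pos (by omega : (0:Int) < 10)]
  omega

-- second while loop; Python raises IndexError when sit+1 ≥ 13 (excluded by Pre_), there we return 0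
def pvA_loop2 (target : Int) (nums : List Int) (res : Int) (sit : Nat) : Int :=
  if nums.sum > target then
    if _h : sit + 1 < 13 then
      pvA_loop2 target ((nums.set sit 0).set (sit + 1) (nums.getD (sit + 1) 0 + 1))
        (res + 10 ^ sit * (10 - nums.getD sit 0)) (sit + 1)
    else 0
  else res
termination_by 13 - sit

def makeIntegerBeautiful (n : Int) (target : Int) : Int :=
  if (pvA_loop1 n (List.replicate 13 0) 0).1.sum ≤ target then 0
  else pvA_loop2 target (pvA_loop1 n (List.replicate 13 0) 0).1 0 0

-- ===== PORT B =====
-- B's digitsum: while m > 0: s += m % 10; m //= 10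
def pvB_digitsum (m : Int) (s : Int) : Int :=
  if h : m > 0 then pvB_digitsum (PySem.Int.floordiv m 10) (s + PySem.Int.mod m 10) else s
termination_by m.toNat
decreasing_by
  rw [PySem.Int.floordiv_eq_ediv_of_pos (by omega : (0:Int) < 10)]
  omega

-- B's `while True` loop over base = 10, 100, …; in Python it is unbounded (it diverges only
-- outside Pre_); ported with fuel, 64 is enough for every |n| ≤ 2^31 with target ≥ 1
def pvB_loop (n target base : Int) : Nat → Int
  | 0 => 0
  | fuel + 1 =>
    let new_n := (PySem.Int.floordiv n base + 1) * base
    if pvB_digitsum new_n 0 ≤ target then new_n - n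
    else pvB_loop n target (base * 10) fuel

def makeIntegerBeautiful_alt (n : Int) (target : Int) : Int :=
  if pvB_digitsum n 0 ≤ target then 0
  else pvB_loop n target 10 64

-- ===== PRECONDITION & SPEC =====
-- Pre_ excludes exactly the inputs where A raises IndexError (the carry runs off the
-- 13-cell array, because a positive integer's digit sum can never reach a target < 1).
def Pre_makeIntegerBeautiful (n : Int) (target : Int) : Prop :=
  1 ≤ target ∨ (n ≤ 0 ∧ 0 ≤ target)
instance (n : Int) (target : Int) : Decidable (Pre_makeIntegerBeautiful n target) := by
  unfold Pre_makeIntegerBeautiful; infer_instance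

def pvWitness_makeIntegerBeautiful : Int × Int := (95, 1)

def Spec_makeIntegerBeautiful (n : Int) (target : Int) (out : Int) : Prop := out = makeIntegerBeautiful_alt n target
instance (n : Int) (target : Int) (out : Int) : Decidable (Spec_makeIntegerBeautiful n target out) := by unfold Spec_makeIntegerBeautiful; infer_instance

-- ===== CLAIM (what is proved, stated in full; the proofs are below) =====
def Claim_equal_makeIntegerBeautiful : Prop := ∀ (n : Int) (target : Int), Dom_makeIntegerBeautiful n target → Pre_makeIntegerBeautiful n target → Spec_makeIntegerBeautiful n target (makeIntegerBeautiful n target)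

-- ===== LEMMAS AND PROOFS =====

-- digit i of n (for 0 ≤ n), and the mathematical digit sum
def pvDig (n : Int) (i : Nat) : Int := n / 10 ^ i % 10

def pvDsum (m : Int) : Int :=
  if h : m > 0 then m % 10 + pvDsum (m / 10) else 0
termination_by m.toNat
decreasing_by omega

lemma pvB_digitsum_eq (m s : Int) : pvB_digitsum m s = s + pvDsum m := by
  by_cases h : m > 0
  · rw [pvB_digitsum, pvDsum, dif_pos h, dif_pos h,
      PySem.Int.floordiv_eq_ediv_of_pos (by omega : (0:Int) < 10),
      PySem.Int.mod_eq_emod_of_pos (by omega : (0:Int) < 10),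
      pvB_digitsum_eq (m / 10)]
    ring
  · rw [pvB_digitsum, pvDsum, dif_neg h, dif_neg h]; ring
termination_by m.toNat
decreasing_by omega

lemma pvDsum_nonpos (m : Int) (h : m ≤ 0) : pvDsum m = 0 := by
  rw [pvDsum, dif_neg (by omega)]

lemma pvDsum_unfold (m : Int) (h : 0 ≤ m) : pvDsum m = m % 10 + pvDsum (m / 10) := by
  by_cases h' : m > 0
  · rw [pvDsum, dif_pos h']
  · have : m = 0 := by omega
    subst this; simp [pvDsum_nonpos]

lemma pvDsum_nonneg (m : Int) : 0 ≤ pvDsum m := by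
  by_cases h : m > 0
  · rw [pvDsum, dif_pos h]
    have := pvDsum_nonneg (m / 10)
    omega
  · rw [pvDsum, dif_neg h]
termination_by m.toNat
decreasing_by omega

lemma pvDsum_mul10 (m : Int) (h : 0 ≤ m) : pvDsum (m * 10) = pvDsum m := by
  by_cases h' : m > 0
  · rw [pvDsum_unfold (m * 10) (by omega)]
    have h1 : m * 10 % 10 = 0 := by omega
    have h2 : m * 10 / 10 = m := by omega
    rw [h1, h2]; ring
  · have : m = 0 := by omega
    subst this; simp

lemma pvDsum_mul_pow (m : Int) (h : 0 ≤ m) (k : Nat) : pvDsum (m * 10 ^ k) = pvDsum m := by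
  induction k with
  | zero => simp
  | succ k ih =>
    have : m * 10 ^ (k + 1) = (m * 10 ^ k) * 10 := by ring
    rw [this, pvDsum_mul10 _ (by positivity), ih]

lemma pvDsum_succ_le (q : Int) (h : 0 ≤ q) : pvDsum (q + 1) ≤ pvDsum q + 1 := by
  by_cases h9 : q % 10 = 9
  · rw [pvDsum_unfold (q + 1) (by omega), pvDsum_unfold q h]
    have h1 : (q + 1) % 10 = 0 := by omega
    have h2 : (q + 1) / 10 = q / 10 + 1 := by omega
    rw [h1, h2]
    have := pvDsum_succ_le (q / 10) (by omega)
    omega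
  · rw [pvDsum_unfold (q + 1) (by omega), pvDsum_unfold q h]
    have h1 : (q + 1) % 10 = q % 10 + 1 := by omega
    have h2 : (q + 1) / 10 = q / 10 := by omega
    rw [h1, h2]; ring_nf; omega
termination_by q.toNat
decreasing_by omega

lemma pvDsum_succ_eq (q : Int) (h : 0 ≤ q) (h9 : q % 10 ≠ 9) :
    pvDsum (q + 1) = pvDsum q + 1 := by
  rw [pvDsum_unfold (q + 1) (by omega), pvDsum_unfold q h]
  have h1 : (q + 1) % 10 = q % 10 + 1 := by omega
  have h2 : (q + 1) / 10 = q / 10 := by omega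
  rw [h1, h2]; ring

-- the digit array A holds at stage k ≥ 1 of its second loop (position k carries the +1)
def pvStage (n : Int) (k : Nat) : List Int :=
  (List.range 13).map (fun i => if i < k then 0 else if i = k then pvDig n k + 1 else pvDig n i)

def pvDigs (n : Int) : List Int := (List.range 13).map (fun i => pvDig n i)

lemma pvList_sum_range (f : Nat → Int) (m : Nat) :
    ((List.range m).map f).sum = ∑ i ∈ Finset.range m, f i := by
  induction m with
  | zero => simp
  | succ m ih => rw [List.range_succ, Finset.sum_range_succ, List.map_append, List.sum_append, ih]; simp

lemma pvDig_div10 (m : Int) (j : Nat) : pvDig (m / 10) j = pvDig m (j + 1) := by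
  unfold pvDig
  rw [Int.ediv_ediv_eq_ediv_mul, mul_comm, ← pow_succ]
  positivity

-- tail sum T k = Σ_{k ≤ i < 13} dig n i
lemma pvTail_sum (n : Int) (hn : 0 ≤ n) (hb : n < 10 ^ 10) :
    ∀ d k, k + d = 10 →
      (∑ i ∈ Finset.range 13, (if i < k then 0 else pvDig n i)) = pvDsum (n / 10 ^ k) := by
  intro d
  induction d with
  | zero =>
    intro k hk
    have hk10 : k = 10 := by omega
    subst hk10
    have h10 : n / 10 ^ 10 = 0 := by
      apply Int.ediv_eq_zero_of_lt hn; norm_num at hb ⊢; omega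
    have h11 : n / 10 ^ 11 = 0 := by
      have : (10:Int) ^ 11 = 10 ^ 10 * 10 := by ring
      rw [this, ← Int.ediv_ediv_eq_ediv_mul, h10]
      · simp
      · positivity
    have h12 : n / 10 ^ 12 = 0 := by
      have : (10:Int) ^ 12 = 10 ^ 10 * 100 := by ring
      rw [this, ← Int.ediv_ediv_eq_ediv_mul, h10]
      · simp
      · positivity
    rw [h10, pvDsum_nonpos 0 (by omega)]
    rw [show (13:Nat) = 12 + 1 from rfl]
    repeat rw [Finset.sum_range_succ]
    simp only [pvDig, h10, h11, h12]
    norm_num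
  | succ d ih =>
    intro k hk
    have hk9 : k ≤ 9 := by omega
    have step : (∑ i ∈ Finset.range 13, (if i < k then 0 else pvDig n i))
        = pvDig n k + ∑ i ∈ Finset.range 13, (if i < k + 1 then 0 else pvDig n i) := by
      have : ∀ i ∈ Finset.range 13,
          (if i < k then 0 else pvDig n i)
            = (if i = k then pvDig n k else 0) + (if i < k + 1 then 0 else pvDig n i) := by
        intro i _
        by_cases h1 : i < k
        · rw [if_pos h1, if_neg (by omega), if_pos (by omega)]; ring
        · by_cases h2 : i = k
          · subst h2; rw [if_neg (by omega), if_pos rfl, if_pos (by omega)]; ring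
          · rw [if_neg h1, if_neg h2, if_neg (by omega)]; ring
      rw [Finset.sum_congr rfl this, Finset.sum_add_distrib,
        Finset.sum_ite_eq' (Finset.range 13) k (fun _ => pvDig n k)]
      rw [if_pos (Finset.mem_range.mpr (by omega : k < 13))]
    rw [step, ih (k + 1) (by omega)]
    rw [pvDsum_unfold (n / 10 ^ k) (by positivity)]
    have hsh : n / 10 ^ (k + 1) = n / 10 ^ k / 10 := by
      rw [pow_succ, ← Int.ediv_ediv_eq_ediv_mul]
      positivity
    rw [hsh]
    unfold pvDig
    ring

lemma pvStage_sum (n : Int) (hn : 0 ≤ n) (hb : n < 10 ^ 10) (k : Nat) (hk1 : 1 ≤ k) (hk : k ≤ 10) :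
    (pvStage n k).sum = pvDsum (n / 10 ^ k) + 1 := by
  unfold pvStage
  rw [pvList_sum_range]
  have : ∀ i ∈ Finset.range 13,
      (if i < k then 0 else if i = k then pvDig n k + 1 else pvDig n i)
        = (if i < k then 0 else pvDig n i) + (if i = k then 1 else 0) := by
    intro i _
    by_cases h1 : i < k
    · rw [if_pos h1, if_pos h1, if_neg (by omega)]; ring
    · by_cases h2 : i = k
      · subst h2; rw [if_neg h1, if_neg h1, if_pos rfl, if_pos rfl]
      · rw [if_neg h1, if_neg h1, if_neg h2, if_neg h2]; ring
  rw [Finset.sum_congr rfl this, Finset.sum_add_distrib,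
    Finset.sum_ite_eq' (Finset.range 13) k (fun _ => (1:Int)),
    pvTail_sum n hn hb (10 - k) k (by omega)]
  simp [Finset.mem_range.mpr (by omega : k < 13)]

lemma pvDigs_sum (n : Int) (hn : 0 ≤ n) (hb : n < 10 ^ 10) : (pvDigs n).sum = pvDsum n := by
  unfold pvDigs
  rw [pvList_sum_range]
  have := pvTail_sum n hn hb 10 0 (by omega)
  simpa using this

-- A's first loop writes exactly the digits of n (for 0 ≤ n < 10^10) into the zero array
lemma pvA_loop1_char (m : Int) (hm : 0 ≤ m) :
    ∀ (nums : List Int) (c : Nat), nums.length = 13 →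
      (∀ i, c ≤ i → i < 13 → nums.getD i 0 = 0) →
      (pvA_loop1 m nums c).1
        = (List.range 13).map (fun i => if i < c then nums.getD i 0 else pvDig m (i - c)) := by
  intro nums c hlen hzero
  by_cases h : m > 0
  · rw [pvA_loop1, dif_pos h,
      PySem.Int.floordiv_eq_ediv_of_pos (by omega : (0:Int) < 10),
      PySem.Int.mod_eq_emod_of_pos (by omega : (0:Int) < 10)]
    by_cases hc : c < 13
    · rw [pvA_loop1_char (m / 10) (by omega) (nums.set c (m % 10)) (c + 1)
        (by simp [hlen])
        (by intro i hi1 hi2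
            rw [List.getD_eq_getElem?_getD, List.getElem?_set_ne (by omega)]
            rw [← List.getD_eq_getElem?_getD]
            exact hzero i (by omega) hi2)]
      apply List.map_congr_left
      intro i hi
      have hi13 : i < 13 := List.mem_range.mp hi
      by_cases h1 : i < c
      · rw [if_pos (by omega), if_pos h1,
          List.getD_eq_getElem?_getD, List.getElem?_set_ne (by omega),
          ← List.getD_eq_getElem?_getD]
      · by_cases h2 : i = c
        · subst h2
          rw [if_pos (by omega), List.getD_eq_getElem?_getD,
            List.getElem?_set_self (by omega), Option.getD_some]
          unfold pvDig
          simp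
        · rw [if_neg (by omega), if_neg h1]
          have h3 : i - c = (i - (c + 1)) + 1 := by omega
          rw [h3, ← pvDig_div10]
    · -- c ≥ 13: set is out of range, a no-op; recurse with same zero array
      rw [pvA_loop1_char (m / 10) (by omega) (nums.set c (m % 10)) (c + 1)
        (by simp [hlen]) (by intro i hi1 hi2; omega)]
      apply List.map_congr_left
      intro i hi
      have hi13 : i < 13 := List.mem_range.mp hi
      rw [if_pos (by omega), if_pos (by omega),
        List.getD_eq_getElem?_getD, List.getElem?_set_ne (by omega),
        ← List.getD_eq_getElem?_getD]
  · rw [pvA_loop1, dif_neg h]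
    have hm0 : m = 0 := by omega
    subst hm0
    apply List.ext_getElem (by simp [hlen])
    intro i hi1 hi2
    simp only [List.getElem_map, List.getElem_range]
    simp only [List.length_map, List.length_range] at hi2
    by_cases h1 : i < c
    · rw [if_pos h1, List.getD_eq_getElem?_getD, List.getElem?_eq_getElem (by omega)]
      simp
    · rw [if_neg h1]
      have := hzero i (by omega) (by omega)
      rw [List.getD_eq_getElem?_getD, List.getElem?_eq_getElem (by omega)] at this
      simp at this
      rw [this]
      unfold pvDig
      simp
termination_by m.toNat
decreasing_by all_goals omega

lemma pvA_loop1_digs (n : Int) (hn : 0 ≤ n) :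
    (pvA_loop1 n (List.replicate 13 0) 0).1 = pvDigs n := by
  rw [pvA_loop1_char n hn (List.replicate 13 0) 0 (by simp)
    (by intro i _ hi
        rw [List.getD_eq_getElem?_getD, List.getElem?_replicate]
        split <;> rfl)]
  unfold pvDigs
  simp

-- accessing the stage array
lemma pvStage_getD (n : Int) (k i : Nat) (hi : i < 13) :
    (pvStage n k).getD i 0 = (if i < k then 0 else if i = k then pvDig n k + 1 else pvDig n i) := by
  unfold pvStage
  rw [List.getD_eq_getElem?_getD, List.getElem?_eq_getElem (by simp [hi]), List.getElem_map,
    List.getElem_range]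
  simp

lemma pvDigs_getD (n : Int) (i : Nat) (hi : i < 13) : (pvDigs n).getD i 0 = pvDig n i := by
  unfold pvDigs
  rw [List.getD_eq_getElem?_getD, List.getElem?_eq_getElem (by simp [hi]), List.getElem_map,
    List.getElem_range]
  simp

-- A's array update at stage k is exactly the stage-(k+1) array
lemma pvStage_step (n : Int) (k : Nat) (hk1 : 1 ≤ k) (hk : k + 1 < 13) :
    ((pvStage n k).set k 0).set (k + 1) ((pvStage n k).getD (k + 1) 0 + 1) = pvStage n (k + 1) := by
  apply List.ext_getElem (by unfold pvStage; simp)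
  intro i hi1 hi2
  have hi13 : i < 13 := by unfold pvStage at hi2; simp at hi2; omega
  have hgd := pvStage_getD n k (k + 1) (by omega)
  rw [if_neg (by omega), if_neg (by omega)] at hgd
  have hlen : ((pvStage n k).set k 0).length = 13 := by unfold pvStage; simp
  by_cases h1 : i = k + 1
  · subst h1
    rw [List.getElem_set_self (by omega), hgd]
    unfold pvStage
    simp only [List.getElem_map, List.getElem_range]
    rw [if_neg (by omega)]
    simp
  · rw [List.getElem_set_ne (by omega)]
    by_cases h2 : i = k
    · subst h2
      rw [List.getElem_set_self (by omega)]
      unfold pvStage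
      simp only [List.getElem_map, List.getElem_range]
      rw [if_pos (by omega)]
    · rw [List.getElem_set_ne (by omega)]
      unfold pvStage
      simp only [List.getElem_map, List.getElem_range]
      by_cases h3 : i < k
      · rw [if_pos h3, if_pos (by omega)]
      · rw [if_neg h3, if_neg h2, if_neg (by omega), if_neg h1]

lemma pvDigs_step (n : Int) :
    ((pvDigs n).set 0 0).set 1 ((pvDigs n).getD 1 0 + 1) = pvStage n 1 := by
  apply List.ext_getElem (by unfold pvDigs pvStage; simp)
  intro i hi1 hi2
  have hi13 : i < 13 := by unfold pvStage at hi2; simp at hi2; omega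
  have hgd := pvDigs_getD n 1 (by omega)
  by_cases h1 : i = 1
  · subst h1
    rw [List.getElem_set_self (by unfold pvDigs; simp), hgd]
    unfold pvStage
    simp only [List.getElem_map, List.getElem_range]
    rw [if_neg (by omega)]
    simp
  · rw [List.getElem_set_ne (by omega)]
    by_cases h2 : i = 0
    · subst h2
      rw [List.getElem_set_self (by unfold pvDigs; simp)]
      unfold pvStage
      simp only [List.getElem_map, List.getElem_range]
      rw [if_pos (by omega)]
    · rw [List.getElem_set_ne (by omega)]
      unfold pvDigs pvStage
      simp only [List.getElem_map, List.getElem_range]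
      rw [if_neg (by omega), if_neg h1]

-- when the low digit of the current quotient is 9, B's check at base 10^k is redundant
lemma pvB_redundant9 (n target : Int) (k : Nat) (g : Nat) (hn : 0 < n)
    (h9 : n / 10 ^ k % 10 = 9) :
    pvB_loop n target (10 ^ k) (g + 2) = pvB_loop n target (10 ^ k * 10) (g + 1) := by
  have hbpos : (0:Int) < 10 ^ k := by positivity
  have hq : PySem.Int.floordiv n (10 ^ k) = n / 10 ^ k := PySem.Int.floordiv_eq_ediv_of_pos hbpos
  have hq' : PySem.Int.floordiv n (10 ^ k * 10) = n / 10 ^ k / 10 := by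
    rw [PySem.Int.floordiv_eq_ediv_of_pos (by positivity),
      ← Int.ediv_ediv_eq_ediv_mul]
    positivity
  have hval : (n / 10 ^ k + 1) * 10 ^ k = (n / 10 ^ k / 10 + 1) * (10 ^ k * 10) := by
    have : n / 10 ^ k + 1 = (n / 10 ^ k / 10 + 1) * 10 := by omega
    rw [this]; ring
  show (if pvB_digitsum ((PySem.Int.floordiv n (10 ^ k) + 1) * 10 ^ k) 0 ≤ target
        then (PySem.Int.floordiv n (10 ^ k) + 1) * 10 ^ k - n
        else pvB_loop n target (10 ^ k * 10) (g + 1))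
      = if pvB_digitsum ((PySem.Int.floordiv n (10 ^ k * 10) + 1) * (10 ^ k * 10)) 0 ≤ target
        then (PySem.Int.floordiv n (10 ^ k * 10) + 1) * (10 ^ k * 10) - n
        else pvB_loop n target (10 ^ k * 10 * 10) g
  rw [hq, hq', ← hval]
  by_cases hC : pvB_digitsum ((n / 10 ^ k + 1) * 10 ^ k) 0 ≤ target
  · rw [if_pos hC, if_pos hC]
  · rw [if_neg hC, if_neg hC]
    show (if pvB_digitsum ((PySem.Int.floordiv n (10 ^ k * 10) + 1) * (10 ^ k * 10)) 0 ≤ target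
          then (PySem.Int.floordiv n (10 ^ k * 10) + 1) * (10 ^ k * 10) - n
          else pvB_loop n target (10 ^ k * 10 * 10) g) = _
    rw [hq', ← hval, if_neg hC]

-- main bridge: from stage k, A's carry loop equals B's base loop started at 10^k
lemma pvA2B (n target : Int) (hn : 0 < n) (hb : n < 10 ^ 10) (ht : 1 ≤ target) :
    ∀ (d k : Nat) (f : Nat), k + d = 10 → 1 ≤ k → 11 - k ≤ f →
      pvA_loop2 target (pvStage n k) ((n / 10 ^ k + 1) * 10 ^ k - n) k
        = pvB_loop n target (10 ^ k) f := by
  intro d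
  induction d with
  | zero =>
    intro k f hk hk1 hf
    have hk10 : k = 10 := by omega
    subst hk10
    have hq0 : n / 10 ^ 10 = 0 := by
      apply Int.ediv_eq_zero_of_lt (by omega); norm_num at hb ⊢; omega
    have hsum : (pvStage n 10).sum = 1 := by
      rw [pvStage_sum n (by omega) hb 10 (by omega) (by omega), hq0, pvDsum_nonpos 0 (by omega)]
      norm_num
    rw [pvA_loop2, if_neg (by omega)]
    obtain ⟨f', rfl⟩ : ∃ f', f = f' + 1 := ⟨f - 1, by omega⟩
    show _ = if pvB_digitsum ((PySem.Int.floordiv n (10 ^ 10) + 1) * 10 ^ 10) 0 ≤ target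
        then (PySem.Int.floordiv n (10 ^ 10) + 1) * 10 ^ 10 - n else _
    rw [PySem.Int.floordiv_eq_ediv_of_pos (by positivity), hq0]
    rw [if_pos (by
      rw [pvB_digitsum_eq]
      simp only [zero_add]
      rw [pvDsum_mul_pow 1 (by omega) 10]
      rw [pvDsum, dif_pos (by omega), show (1:Int) / 10 = 0 from by decide,
        pvDsum_nonpos 0 (by omega)]
      omega)]
  | succ d ih =>
    intro k f hk hk1 hf
    have hk9 : k ≤ 9 := by omega
    have hq_nonneg : 0 ≤ n / 10 ^ k := by positivity
    set q := n / 10 ^ k with hqdef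
    have hsum : (pvStage n k).sum = pvDsum q + 1 :=
      pvStage_sum n (by omega) hb k hk1 (by omega)
    have hq_shift : n / 10 ^ (k + 1) = q / 10 := by
      rw [pow_succ, ← Int.ediv_ediv_eq_ediv_mul]
      positivity
    have hCeq : ∀ m : Int, 0 ≤ m →
        pvB_digitsum ((m + 1) * 10 ^ k) 0 = pvDsum (m + 1) := by
      intro m hm
      rw [pvB_digitsum_eq, pvDsum_mul_pow (m + 1) (by omega) k]
      ring
    by_cases hstop : pvDsum q + 1 ≤ target
    · -- A stops; B's check at 10^k succeeds since dsum(q+1) ≤ dsum q + 1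
      rw [pvA_loop2, if_neg (by omega)]
      obtain ⟨f', rfl⟩ : ∃ f', f = f' + 1 := ⟨f - 1, by omega⟩
      show _ = if pvB_digitsum ((PySem.Int.floordiv n (10 ^ k) + 1) * 10 ^ k) 0 ≤ target
          then (PySem.Int.floordiv n (10 ^ k) + 1) * 10 ^ k - n else _
      rw [PySem.Int.floordiv_eq_ediv_of_pos (by positivity), ← hqdef,
        if_pos (by rw [hCeq q hq_nonneg]; have := pvDsum_succ_le q hq_nonneg; omega)]
    · -- A steps from stage k to stage k+1
      rw [pvA_loop2, if_pos (by omega), dif_pos (by omega)]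
      have hget_k : (pvStage n k).getD k 0 = pvDig n k + 1 := by
        rw [pvStage_getD n k k (by omega), if_neg (by omega), if_pos rfl]
      have hdig : pvDig n k = q % 10 := rfl
      have hres : (n / 10 ^ k + 1) * 10 ^ k - n + 10 ^ k * (10 - (pvStage n k).getD k 0)
          = (n / 10 ^ (k + 1) + 1) * 10 ^ (k + 1) - n := by
        rw [hget_k, hdig, hq_shift, ← hqdef]
        obtain ⟨s, r, hsr, _, _⟩ : ∃ s r, q = 10 * s + r ∧ 0 ≤ r ∧ r < 10 :=
          ⟨q / 10, q % 10, by omega, by omega, by omega⟩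
        have h1 : q % 10 = r := by omega
        have h2 : q / 10 = s := by omega
        rw [h1, h2, hsr, pow_succ]
        ring
      rw [pvStage_step n k hk1 (by omega), hres,
        ih (k + 1) (f - 1) (by omega) (by omega) (by omega)]
      -- now relate B at 10^k with fuel f to B at 10^(k+1) with fuel f-1
      by_cases h9 : q % 10 = 9
      · obtain ⟨g, rfl⟩ : ∃ g, f = g + 2 := ⟨f - 2, by omega⟩
        rw [pow_succ]
        exact (pvB_redundant9 n target k g hn (by rw [← hqdef]; exact h9)).symm
      · -- low digit ≠ 9: B's check at 10^k fails outright
        obtain ⟨f', rfl⟩ : ∃ f', f = f' + 1 := ⟨f - 1, by omega⟩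
        have hC : ¬ pvB_digitsum ((q + 1) * 10 ^ k) 0 ≤ target := by
          rw [hCeq q hq_nonneg, pvDsum_succ_eq q hq_nonneg h9]
          omega
        show _ = if pvB_digitsum ((PySem.Int.floordiv n (10 ^ k) + 1) * 10 ^ k) 0 ≤ target
            then (PySem.Int.floordiv n (10 ^ k) + 1) * 10 ^ k - n
            else pvB_loop n target (10 ^ k * 10) f'
        rw [PySem.Int.floordiv_eq_ediv_of_pos (by positivity), ← hqdef, if_neg hC, pow_succ]
        simp

-- ===== VERDICT (by name: the statement is the Claim_ definition above) =====
theorem makeIntegerBeautiful_spec : Claim_equal_makeIntegerBeautiful := by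
  intro n target hdom hpre
  unfold Spec_makeIntegerBeautiful makeIntegerBeautiful makeIntegerBeautiful_alt
  by_cases hn : 0 < n
  · have ht : 1 ≤ target := by
      rcases hpre with h | h
      · exact h
      · omega
    have hb : n < 10 ^ 10 := by
      unfold Dom_makeIntegerBeautiful pvDomInt at hdom
      simp at hdom
      norm_num
      omega
    rw [pvA_loop1_digs n (by omega), pvDigs_sum n (by omega) hb, pvB_digitsum_eq, zero_add]
    by_cases hle : pvDsum n ≤ target
    · rw [if_pos hle, if_pos hle]
    · rw [if_neg hle, if_neg hle]
      rw [pvA_loop2, if_pos (by rw [pvDigs_sum n (by omega) hb]; omega), dif_pos (by omega)]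
      rw [pvDigs_step n]
      have hres0 : (0:Int) + 10 ^ 0 * (10 - (pvDigs n).getD 0 0) = (n / 10 ^ 1 + 1) * 10 ^ 1 - n := by
        rw [pvDigs_getD n 0 (by omega)]
        unfold pvDig
        simp only [pow_zero, pow_one]
        omega
      rw [hres0, pvA2B n target hn hb ht 9 1 64 (by omega) (by omega) (by omega)]
      norm_num
  · -- n ≤ 0: both return 0
    have ht0 : 0 ≤ target := by rcases hpre with h | h <;> omega
    rw [pvA_loop1, dif_neg hn, pvB_digitsum, dif_neg hn]
    have : (List.replicate 13 (0:Int)).sum = 0 := by simp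
    simp only [this]
    rw [if_pos ht0, if_pos ht0]
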